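-- pv_equiv track=rewrite | github.com/ahmedsameh1510/-Algorithms-and-Data-Structures-training---IEEE-CS-ZSB | BowWow and the Timetable.py | trains
-- ===== SOURCE A (Python) =====
-- def trains(decimall):
--     number=0
--     i=0
--     while True:
--         if decimall<=4**i:
--             break
--         number+=1
--         i+=1
--     return number
-- ===== SOURCE B (Python) =====
-- def trains(decimall):
--     if decimall <= 1:
--         return 0
--     return ((decimall - 1).bit_length() + 1) // 2
-- ===== Notes on version B (the rewrite author's own statement) =====
-- stated objective: idiomatic
-- what changed: Replaced the while-loop over growing powers of four with a closed-form computation from the bit length of decimall-1, using that the least i with the i-th power of four at least n is the rounded-up half of the bit length of n-1.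
import Mathlib
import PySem

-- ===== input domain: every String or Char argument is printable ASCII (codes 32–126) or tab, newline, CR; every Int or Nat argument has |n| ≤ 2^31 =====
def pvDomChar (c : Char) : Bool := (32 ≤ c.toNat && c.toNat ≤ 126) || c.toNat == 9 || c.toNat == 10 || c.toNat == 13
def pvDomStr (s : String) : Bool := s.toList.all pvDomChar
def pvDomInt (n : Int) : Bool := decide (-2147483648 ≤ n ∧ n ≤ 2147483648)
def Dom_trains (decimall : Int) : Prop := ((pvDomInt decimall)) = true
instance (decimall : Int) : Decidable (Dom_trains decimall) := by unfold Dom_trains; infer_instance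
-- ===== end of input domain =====

-- B replaces A's while-loop over growing powers of 4 by a closed form from bit_length (objective: idiomatic/closed form).

-- ===== PORT A =====
-- the while-loop: number and i advance together until decimall ≤ 4^i
def trainsLoop (decimall : Int) (number : Int) (i : Nat) : Int :=
  if decimall ≤ (4:Int) ^ i then number
  else trainsLoop decimall (number + 1) (i + 1)
termination_by (decimall - (4:Int) ^ i).toNat
decreasing_by
  have h1 : (4:Int) ^ i < 4 ^ (i + 1) := by
    have : (1:Int) ≤ 4 ^ i := one_le_pow₀ (by norm_num)
    calc (4:Int) ^ i < 4 ^ i + 3 * 4 ^ i := by linarith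
    _ = 4 ^ (i+1) := by ring
  omega

def trains (decimall : Int) : Int := trainsLoop decimall 0 0

-- ===== PORT B =====
def trains_alt (decimall : Int) : Int :=
  if decimall ≤ 1 then 0
  else ((PySem.Int.bitLength (decimall - 1) + 1) / 2 : Nat)

-- ===== PRECONDITION & SPEC =====
def Spec_trains (decimall : Int) (out : Int) : Prop := out = trains_alt decimall
instance (decimall : Int) (out : Int) : Decidable (Spec_trains decimall out) := by unfold Spec_trains; infer_instance

-- ===== CLAIM (what is proved, stated in full; the proofs are below) =====
def Claim_equal_trains : Prop := ∀ (decimall : Int), Dom_trains decimall → Spec_trains decimall (trains decimall)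

-- ===== LEMMAS AND PROOFS =====

-- If r ≥ i is the least index ≥ i with d ≤ 4^r, the loop from (n, i) returns n + (r - i).
theorem trainsLoop_eq (decimall : Int) (r : Nat)
    (hr : decimall ≤ (4:Int) ^ r) (hmin : ∀ j < r, (4:Int) ^ j < decimall) :
    ∀ i n, i ≤ r → trainsLoop decimall n i = n + ((r : Int) - i) := by
  intro i
  induction hk : r - i generalizing i with
  | zero =>
    intro n hi
    have : i = r := by omega
    subst this
    rw [trainsLoop, if_pos hr]
    omega
  | succ k ih =>
    intro n hi
    have hlt : i < r := by omega
    have : (4:Int) ^ i < decimall := hmin i hlt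
    rw [trainsLoop, if_neg (by omega)]
    have := ih (i + 1) (by omega) (n + 1) (by omega)
    rw [this]
    push_cast
    ring

-- B's value b satisfies d ≤ 4^b and ∀ j < b, 4^j < d.
theorem alt_upper (decimall : Int) (h : 1 < decimall) :
    decimall ≤ (4:Int) ^ ((PySem.Int.bitLength (decimall - 1) + 1) / 2) := by
  set m := decimall - 1 with hm
  have hm0 : m ≠ 0 := by omega
  have habs : m.natAbs = m.toNat := by omega
  have hlt : m.natAbs < 2 ^ PySem.Int.bitLength m := PySem.Int.lt_two_pow_bitLength m
  set L := PySem.Int.bitLength m with hL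
  have h2 : L ≤ 2 * ((L + 1) / 2) := by omega
  have hpow : (2:Nat) ^ L ≤ 2 ^ (2 * ((L + 1) / 2)) := Nat.pow_le_pow_right (by norm_num) h2
  have : m.natAbs < 2 ^ (2 * ((L + 1) / 2)) := lt_of_lt_of_le hlt hpow
  have h4 : (2:Nat) ^ (2 * ((L + 1) / 2)) = 4 ^ ((L + 1) / 2) := by
    rw [pow_mul]; norm_num
  rw [h4] at this
  have h5 : m < ((4:Nat) ^ ((L + 1) / 2) : Int) := by
    exact_mod_cast lt_of_le_of_lt (Int.le_natAbs) (by exact_mod_cast this)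
  have h6 : ((4:Nat) ^ ((L + 1) / 2) : Int) = (4:Int) ^ ((L + 1) / 2) := by push_cast; ring
  rw [h6] at h5
  linarith

theorem alt_lower (decimall : Int) (h : 1 < decimall) :
    ∀ j < (PySem.Int.bitLength (decimall - 1) + 1) / 2, (4:Int) ^ j < decimall := by
  intro j hj
  set m := decimall - 1 with hm
  have hm0 : m ≠ 0 := by omega
  have hle : 2 ^ (PySem.Int.bitLength m - 1) ≤ m.natAbs := PySem.Int.two_pow_bitLength_le m hm0
  set L := PySem.Int.bitLength m with hL
  have h2j : 2 * j ≤ L - 1 := by omega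
  have hpow : (2:Nat) ^ (2 * j) ≤ 2 ^ (L - 1) := Nat.pow_le_pow_right (by norm_num) h2j
  have h4 : (2:Nat) ^ (2 * j) = 4 ^ j := by rw [pow_mul]; norm_num
  have hnat : (4:Nat) ^ j ≤ m.natAbs := by omega
  have habs : (m.natAbs : Int) = m := Int.natAbs_of_nonneg (by omega)
  have h5 : ((4:Nat) ^ j : Int) ≤ m := by rw [← habs]; exact_mod_cast hnat
  have h6 : ((4:Nat) ^ j : Int) = (4:Int) ^ j := by push_cast; ring
  rw [h6] at h5
  linarith

-- ===== VERDICT (by name: the statement is the Claim_ definition above) =====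
theorem trains_spec : Claim_equal_trains := by
  intro d _
  unfold Spec_trains trains trains_alt
  by_cases h : d ≤ 1
  · rw [if_pos h]
    rw [trainsLoop, if_pos (by simpa using le_trans h (by norm_num))]
  · rw [if_neg h]
    replace h : 1 < d := by omega
    set b := (PySem.Int.bitLength (d - 1) + 1) / 2 with hb
    have := trainsLoop_eq d b (alt_upper d h) (fun j hj => alt_lower d h j hj) 0 0 (Nat.zero_le b)
    rw [this]
    push_cast
    ring
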